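-- pv_equiv track=rewrite | github.com/LuCotti/Programacion | UTN/2_Cuatrimestre_1/1_Programacion_1/guia_de_ejercicios/resoluciones_2/11._Cadenas/ejercicio_05_suprimir_vocales.py | suprimir_vocales
-- ===== SOURCE A (Python) =====
-- def suprimir_vocales(cadena: str) -> str:
--     cadena_resultante = ''
--     vocales = 'aeiouáéíóúAEIOUÁÉÍÓÚ'
--     for i in range(len(cadena)):
--         bandera_vocal = 0
--         for j in range(len(vocales)):
--             if cadena[i] == vocales[j]:
--                 bandera_vocal = 1
--         if bandera_vocal == 0:
--             cadena_resultante += cadena[i]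
--
--     return cadena_resultante
-- ===== SOURCE B (Python) =====
-- def suprimir_vocales(cadena: str) -> str:
--     for v in 'aeiouáéíóúAEIOUÁÉÍÓÚ':
--         cadena = cadena.replace(v, '')
--     return cadena
-- ===== Notes on version B (the rewrite author's own statement) =====
-- stated objective: simpler
-- what changed: Replaces A's per-character scan with an inner 20-way membership loop and string concatenation by 20 successive str.replace passes, one per vowel, with no inner loop or flag.
import Mathlib
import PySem

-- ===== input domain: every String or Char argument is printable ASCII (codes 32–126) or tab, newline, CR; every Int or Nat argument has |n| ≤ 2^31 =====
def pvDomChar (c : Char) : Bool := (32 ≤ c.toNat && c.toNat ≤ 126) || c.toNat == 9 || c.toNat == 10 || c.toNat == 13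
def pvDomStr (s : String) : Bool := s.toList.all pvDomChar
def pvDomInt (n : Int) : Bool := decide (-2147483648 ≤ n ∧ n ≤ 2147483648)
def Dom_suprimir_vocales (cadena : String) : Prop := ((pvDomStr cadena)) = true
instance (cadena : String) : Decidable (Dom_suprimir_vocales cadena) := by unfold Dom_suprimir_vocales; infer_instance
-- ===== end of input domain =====

-- B replaces A's per-character scan with an inner 20-way flag loop by 20 successive
-- one-vowel replace passes; same cost, simpler code.

-- ===== PORT A =====
def suprimir_vocales (cadena : String) : String :=
  let vocales : String := "aeiouáéíóúAEIOUÁÉÍÓÚ"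
  String.ofList <|
    (PySem.List.pyRange 0 (PySem.Str.len cadena) 1).foldl (fun acc i =>
      let bandera_vocal : Int :=
        (PySem.List.pyRange 0 (PySem.Str.len vocales) 1).foldl (fun b j =>
          if PySem.List.pyGetD cadena.toList i ' ' = PySem.List.pyGetD vocales.toList j ' '
          then 1 else b) 0
      if bandera_vocal = 0 then acc ++ [PySem.List.pyGetD cadena.toList i ' '] else acc) []

-- ===== PORT B =====
def suprimir_vocales_alt (cadena : String) : String :=
  "aeiouáéíóúAEIOUÁÉÍÓÚ".toList.foldl
    (fun s v => PySem.Str.replace s (String.ofList [v]) "") cadena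

-- ===== PRECONDITION & SPEC =====
def Spec_suprimir_vocales (cadena : String) (out : String) : Prop := out = suprimir_vocales_alt cadena
instance (cadena : String) (out : String) : Decidable (Spec_suprimir_vocales cadena out) := by unfold Spec_suprimir_vocales; infer_instance

-- ===== CLAIM (what is proved, stated in full; the proofs are below) =====
def Claim_equal_suprimir_vocales : Prop := ∀ (cadena : String), Dom_suprimir_vocales cadena → Spec_suprimir_vocales cadena (suprimir_vocales cadena)

-- ===== LEMMAS AND PROOFS =====

-- ===== VERDICT (by name: the statement is the Claim_ definition above) =====
-- vowel characters as a list (proof-side helper)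
def vwl : List Char := "aeiouáéíóúAEIOUÁÉÍÓÚ".toList

theorem go_single (v : Char) : ∀ (l : List Char) (fuel : Nat) (acc : List Char),
    l.length ≤ fuel →
    PySem.Chars.replace.go [v] [] fuel l acc = acc.reverse ++ l.filter (fun c => c ≠ v) := by
  intro l
  induction l with
  | nil =>
    intro fuel acc _
    cases fuel <;> simp [PySem.Chars.replace.go]
  | cons c t ih =>
    intro fuel acc h
    cases fuel with
    | zero => simp at h
    | succ n =>
      simp only [PySem.Chars.replace.go]
      by_cases hv : c = v
      · subst hv
        have hp : [c].isPrefixOf (c :: t) = true := by simp [List.isPrefixOf]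
        rw [if_pos hp]
        simp only [List.length_cons] at h
        rw [show List.drop [c].length (c :: t) = t by simp]
        simp only [List.reverse_nil, List.nil_append]
        rw [ih n acc (by omega)]
        simp
      · have hp : [v].isPrefixOf (c :: t) = false := by
          simp [List.isPrefixOf]; exact fun hh => (hv hh.symm).elim
        rw [if_neg (by simp [hp])]
        simp only [List.length_cons] at h
        rw [ih n (c :: acc) (by omega)]
        simp [hv]

theorem replace_single (v : Char) (s : List Char) :
    PySem.Chars.replace s [v] [] = s.filter (fun c => c ≠ v) := by
  rw [PySem.Chars.replace]
  simp only [List.isEmpty_cons, if_false, Bool.false_eq_true]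
  rw [go_single v s s.length [] (le_refl _)]
  simp

theorem alt_filter : ∀ (vs : List Char) (s : String),
    vs.foldl (fun s v => PySem.Str.replace s (String.ofList [v]) "") s
      = String.ofList (s.toList.filter (fun c => ¬ c ∈ vs)) := by
  intro vs
  induction vs with
  | nil => intro s; simp
  | cons v t ih =>
    intro s
    simp only [List.foldl_cons]
    rw [ih]
    congr 1
    rw [show (PySem.Str.replace s (String.ofList [v]) "").toList
          = PySem.Chars.replace s.toList [v] [] by simp [PySem.Str.replace]]
    rw [replace_single, List.filter_filter]
    apply List.filter_congr
    intro c _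
    by_cases h1 : c = v <;> by_cases h2 : c ∈ t <;> simp [h1, h2]

theorem flagFold (c : Char) : ∀ (vs : List Char) (b : Int),
    vs.foldl (fun b v => if c = v then (1 : Int) else b) b = if c ∈ vs then 1 else b := by
  intro vs
  induction vs with
  | nil => intro b; simp
  | cons v t ih =>
    intro b
    simp only [List.foldl_cons]
    rw [ih]
    by_cases h1 : c ∈ t <;> by_cases h2 : c = v <;> simp [h1, h2]

theorem innerEq (c : Char) :
    (PySem.List.pyRange 0 ("aeiouáéíóúAEIOUÁÉÍÓÚ".toList.length : Int) 1).foldl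
        (fun b j =>
          if c = PySem.List.pyGetD "aeiouáéíóúAEIOUÁÉÍÓÚ".toList j ' ' then (1 : Int) else b) 0
      = if c ∈ "aeiouáéíóúAEIOUÁÉÍÓÚ".toList then 1 else 0 := by
  rw [PySem.List.foldl_pyRange_zero_pyGetD' "aeiouáéíóúAEIOUÁÉÍÓÚ".toList ' '
        (fun b v => if c = v then (1 : Int) else b) 0]
  rw [flagFold]

theorem a_filter (cadena : String) :
    suprimir_vocales cadena = String.ofList (cadena.toList.filter (fun c => ¬ c ∈ vwl)) := by
  simp only [suprimir_vocales]
  rw [PySem.Str.len_eq, PySem.Str.len_eq]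
  refine congrArg String.ofList ?_
  rw [PySem.List.foldl_pyRange_zero_pyGetD' cadena.toList ' '
        (fun acc c =>
          if ((PySem.List.pyRange 0 ("aeiouáéíóúAEIOUÁÉÍÓÚ".toList.length : Int) 1).foldl
                (fun b j =>
                  if c = PySem.List.pyGetD "aeiouáéíóúAEIOUÁÉÍÓÚ".toList j ' ' then (1 : Int) else b)
                0) = 0
          then acc ++ [c] else acc) []]
  simp only [innerEq]
  rw [show (fun (acc : List Char) (c : Char) =>
        if (if c ∈ "aeiouáéíóúAEIOUÁÉÍÓÚ".toList then (1 : Int) else 0) = 0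
        then acc ++ [c] else acc)
      = (fun (acc : List Char) (c : Char) =>
        if ¬ c ∈ "aeiouáéíóúAEIOUÁÉÍÓÚ".toList then acc ++ [c] else acc) by
    funext acc c
    by_cases h : c ∈ "aeiouáéíóúAEIOUÁÉÍÓÚ".toList <;> simp only [h] <;> simp]
  rw [PySem.List.foldl_append_ite_eq_filter]
  simp [vwl]

-- ===== VERDICT =====
theorem suprimir_vocales_spec : Claim_equal_suprimir_vocales := by
  intro cadena _
  unfold Spec_suprimir_vocales
  rw [a_filter, suprimir_vocales_alt, alt_filter]
  simp only [vwl]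
  rfl
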